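-- pv_equiv track=rewrite | github.com/rudolfKischer/comp424-asgn1 | Nqueens/queens.py | get_queens_spaced
-- ===== SOURCE A (Python) =====
-- def get_queens_spaced(n):
--     r = 1
--     queens = []
--     for i in range(n):
--         queens.append(r)
--         r += 2
--         if r >= n:
--             r = 0
--     return queens
-- ===== SOURCE B (Python) =====
-- def get_queens_spaced(n):
--     return ([1] + list(range(3, n, 2)) + list(range(0, n, 2)))[:n]
-- ===== Notes on version B (the rewrite author's own statement) =====
-- stated objective: simpler
-- what changed: Replaces the stateful loop with a reset counter by a closed-form concatenation of two arithmetic ranges (odd columns then even columns) truncated to n entries.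
import Mathlib
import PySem

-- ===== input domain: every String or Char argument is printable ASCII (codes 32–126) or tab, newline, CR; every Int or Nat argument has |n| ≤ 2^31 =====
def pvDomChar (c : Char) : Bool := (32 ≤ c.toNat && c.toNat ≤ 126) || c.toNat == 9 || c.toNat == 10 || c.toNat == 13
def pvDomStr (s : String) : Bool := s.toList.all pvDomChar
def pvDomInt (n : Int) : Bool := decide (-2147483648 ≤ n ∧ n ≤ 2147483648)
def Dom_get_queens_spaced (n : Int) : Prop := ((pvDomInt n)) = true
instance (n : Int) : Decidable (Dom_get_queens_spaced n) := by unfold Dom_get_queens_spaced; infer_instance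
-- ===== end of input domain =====

-- B replaces A's stateful reset-counter loop by a closed-form concatenation of two
-- arithmetic ranges (odds then evens) truncated to n entries; objective: simpler.

-- ===== PORT A =====
-- loop body of A's for-loop (append r, advance by 2, reset to 0 when r >= n)
def pvStepA (n : Int) (st : Int × List Int) (_i : Int) : Int × List Int :=
  let queens := st.2 ++ [st.1]
  let r := st.1 + 2
  if r ≥ n then (0, queens) else (r, queens)

def get_queens_spaced (n : Int) : List Int :=
  ((PySem.List.pyRange 0 n 1).foldl (pvStepA n) (1, [])).2

-- ===== PORT B =====
def get_queens_spaced_alt (n : Int) : List Int :=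
  PySem.List.slice ([1] ++ PySem.List.pyRange 3 n 2 ++ PySem.List.pyRange 0 n 2) none (some n)

-- ===== PRECONDITION & SPEC =====
def Spec_get_queens_spaced (n : Int) (out : List Int) : Prop := out = get_queens_spaced_alt n
instance (n : Int) (out : List Int) : Decidable (Spec_get_queens_spaced n out) := by unfold Spec_get_queens_spaced; infer_instance

-- ===== CLAIM (what is proved, stated in full; the proofs are below) =====
def Claim_equal_get_queens_spaced : Prop := ∀ (n : Int), Dom_get_queens_spaced n → Spec_get_queens_spaced n (get_queens_spaced n)

-- ===== LEMMAS AND PROOFS =====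

-- the sequence of values A appends: m more steps starting from counter r
def pvGen (n : Int) : Nat → Int → List Int
  | 0, _ => []
  | m+1, r => r :: pvGen n m (if r + 2 ≥ n then 0 else r + 2)

lemma pvStepA_eq (n r x : Int) (acc : List Int) :
    pvStepA n (r, acc) x = (if r + 2 ≥ n then 0 else r + 2, acc ++ [r]) := by
  by_cases h : r + 2 ≥ n <;> simp [pvStepA, h]

lemma pvA_foldl (n : Int) (l : List Int) : ∀ (r : Int) (acc : List Int),
    (l.foldl (pvStepA n) (r, acc)).2 = acc ++ pvGen n l.length r := by
  induction l with
  | nil => intro r acc; simp [pvGen]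
  | cons x l ih =>
    intro r acc
    simp only [List.foldl_cons, pvStepA_eq, ih, List.length_cons, pvGen]
    simp

lemma pvGen_arith (n : Int) : ∀ (m : Nat) (r : Int), r + 2*(m:Int) ≤ n + 1 →
    pvGen n m r = (List.range m).map (fun k : Nat => r + 2*(k:Int)) := by
  intro m
  induction m with
  | zero => intro r _; simp [pvGen]
  | succ m ih =>
    intro r h
    rcases Nat.eq_zero_or_pos m with hm | hm
    · subst hm; simp [pvGen]
    · have hlt : ¬ (r + 2 ≥ n) := by push_cast at h; omega
      simp only [pvGen, if_neg hlt]
      rw [ih (r + 2) (by push_cast at h ⊢; omega)]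
      rw [List.range_succ_eq_map, List.map_cons, List.map_map]
      refine List.cons_eq_cons.mpr ⟨by push_cast; ring, ?_⟩
      refine List.map_congr_left (fun k _ => ?_)
      simp only [Function.comp]
      push_cast; ring

lemma pvGen_run (n : Int) : ∀ (m : Nat) (b : Nat) (r : Int), 0 < m →
    r + 2*(m:Int) - 2 < n → n ≤ r + 2*(m:Int) →
    pvGen n (m + b) r = (List.range m).map (fun k : Nat => r + 2*(k:Int)) ++ pvGen n b 0 := by
  intro m
  induction m with
  | zero => intro b r h; omega
  | succ m ih =>
    intro b r _ h1 h2
    rcases Nat.eq_zero_or_pos m with hm | hm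
    · subst hm
      have hr : r + 2 ≥ n := by push_cast at h2; omega
      have hb : 1 + b = b + 1 := by omega
      rw [hb]
      simp [pvGen, if_pos hr]
    · have hlt : ¬ (r + 2 ≥ n) := by push_cast at h1; omega
      have : m + 1 + b = (m + b) + 1 := by omega
      rw [this]
      simp only [pvGen, if_neg hlt]
      rw [ih b (r + 2) hm (by push_cast at h1 ⊢; omega) (by push_cast at h2 ⊢; omega)]
      rw [List.range_succ_eq_map, List.map_cons, List.map_map]
      simp only [List.cons_append]
      refine List.cons_eq_cons.mpr ⟨by push_cast; ring, ?_⟩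
      congr 1
      refine List.map_congr_left (fun k _ => ?_)
      simp only [Function.comp]
      push_cast; ring

lemma pv_shift (m : Nat) (hm : 0 < m) :
    (List.range m).map (fun k : Nat => (1:Int) + 2*(k:Int)) =
      1 :: (List.range (m-1)).map (fun k : Nat => (3:Int) + 2*(k:Int)) := by
  obtain ⟨j, rfl⟩ : ∃ j, m = j + 1 := ⟨m - 1, by omega⟩
  rw [List.range_succ_eq_map, List.map_cons, List.map_map]
  simp only [Nat.add_sub_cancel]
  refine List.cons_eq_cons.mpr ⟨by norm_num, ?_⟩
  refine List.map_congr_left (fun k _ => ?_)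
  simp only [Function.comp]
  push_cast; ring

lemma pv_main (n : Int) : get_queens_spaced n = get_queens_spaced_alt n := by
  rcases lt_trichotomy n 2 with h2 | h2 | h2
  · -- n ≤ 1
    rcases lt_trichotomy n 1 with h1 | h1 | h1
    · -- n ≤ 0
      have hA : get_queens_spaced n = [] := by
        unfold get_queens_spaced
        rw [PySem.List.pyRange_one_eq_nil (by omega)]
        rfl
      have hodd : PySem.List.pyRange 3 n 2 = [] := by
        rw [PySem.List.pyRange_of_pos 3 n (by norm_num)]
        rw [if_neg (by omega)]
        rfl
      have heven : PySem.List.pyRange 0 n 2 = [] := by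
        rw [PySem.List.pyRange_of_pos 0 n (by norm_num)]
        rw [if_neg (by omega)]
        rfl
      unfold get_queens_spaced_alt
      rw [hA, hodd, heven]
      rcases lt_trichotomy n 0 with h0 | h0 | h0
      · obtain ⟨k, hk, hkpos⟩ : ∃ k : Nat, n = -(k:Int) ∧ 0 < k := ⟨n.natAbs, by omega, by omega⟩
        rw [hk, PySem.List.slice_to_neg_natCast _ k hkpos]
        simp
        omega
      · subst h0; rfl
      · omega
    · subst h1; rfl
    · omega
  · subst h2; rfl
  · -- 2 < n
    set m : Nat := (n / 2).toNat with hmdef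
    set b : Nat := n.toNat - m with hbdef
    have hm : (m:Int) = n / 2 := by omega
    have hb : (b:Int) = n - n / 2 := by omega
    have hmpos : 0 < m := by omega
    have hnt : (PySem.List.pyRange 0 n 1).length = m + b := by
      rw [PySem.List.length_pyRange_one]; omega
    -- A side
    have hA : get_queens_spaced n =
        (List.range m).map (fun k : Nat => (1:Int) + 2*(k:Int)) ++
        (List.range b).map (fun k : Nat => (0:Int) + 2*(k:Int)) := by
      unfold get_queens_spaced
      rw [pvA_foldl, hnt, pvGen_run n m b 1 hmpos (by omega) (by omega),
          pvGen_arith n b 0 (by omega)]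
      simp
    -- B side
    have hodd : PySem.List.pyRange 3 n 2 =
        (List.range (m-1)).map (fun k : Nat => (3:Int) + 2*(k:Int)) := by
      rw [PySem.List.pyRange_of_pos 3 n (by norm_num)]
      rcases lt_trichotomy 3 n with h3 | h3 | h3
      · rw [if_pos h3]
        have : ((n - 3 + 2 - 1) / 2).toNat = m - 1 := by omega
        rw [this]
      · rw [if_neg (by omega)]
        have : m - 1 = 0 := by omega
        rw [this]
      · rw [if_neg (by omega)]
        have : m - 1 = 0 := by omega
        rw [this]
    have heven : PySem.List.pyRange 0 n 2 =
        (List.range b).map (fun k : Nat => (0:Int) + 2*(k:Int)) := by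
      rw [PySem.List.pyRange_of_pos 0 n (by norm_num), if_pos (by omega)]
      have : ((n - 0 + 2 - 1) / 2).toNat = b := by omega
      rw [this]
    have hlen : ((1:Int) :: ((List.range (m-1)).map (fun k : Nat => (3:Int) + 2*(k:Int)) ++
        (List.range b).map (fun k : Nat => (0:Int) + 2*(k:Int)))).length ≤ n.toNat := by
      simp; omega
    unfold get_queens_spaced_alt
    rw [hodd, heven, hA, PySem.List.slice_to _ (by omega : (0:Int) ≤ n)]
    rw [List.singleton_append, List.cons_append, List.take_of_length_le hlen]
    rw [pv_shift m hmpos]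
    rfl

-- ===== VERDICT (by name: the statement is the Claim_ definition above) =====
theorem get_queens_spaced_spec : Claim_equal_get_queens_spaced := by
  intro n _
  unfold Spec_get_queens_spaced
  exact pv_main n
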